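-- pv_equiv track=rewrite | github.com/ida-mdc/pixel-patrol | packages/pixel-patrol-base/src/pixel_patrol_base/report/data_utils.py | _strings_to_categorical
-- ===== SOURCE A (Python) =====
-- from typing import List, Tuple, Dict, Optional, Sequence
--
-- def _strings_to_categorical(values: List, min_strip_len: int = 10) -> Dict:
--     """
--     Strip common prefix/suffix from strings, but only if:
--     - The common part is long enough to be worth removing (>=10 chars)
--     - We indicate truncation with '...'
--     """
--     str_vals = [str(v) for v in values]
--
--     if len(str_vals) < 2:
--         return {v: str(v) for v in values}
--
--     # Find common prefix/suffix
--     prefix = _common_prefix(str_vals)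
--     suffix = _common_suffix(str_vals)
--
--     # Only strip if the common part is substantial
--     strip_prefix = len(prefix) >= min_strip_len
--     strip_suffix = len(suffix) >= min_strip_len
--
--     if not strip_prefix and not strip_suffix:
--         return {v: str(v) for v in values}
--
--     shortened = []
--     for s in str_vals:
--         result = s
--         prefix_indicator = ""
--         suffix_indicator = ""
--
--         if strip_prefix:
--             result = result[len(prefix):]
--             prefix_indicator = "..."
--
--         if strip_suffix and len(result) > len(suffix):
--             result = result[:-len(suffix)]
--             suffix_indicator = "..."
--
--         final = f"{prefix_indicator}{result}{suffix_indicator}"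
--         # Don't allow empty or just ellipsis
--         shortened.append(final if result else s)
--
--     # Only use shortened if all still unique
--     if len(set(shortened)) == len(values):
--         return {orig: short for orig, short in zip(values, shortened)}
--
--     return {v: str(v) for v in values}
--
-- def _common_prefix(strings: List[str]) -> str:
--     """Find longest common prefix."""
--     if not strings:
--         return ""
--     prefix = strings[0]
--     for s in strings[1:]:
--         while not s.startswith(prefix):
--             prefix = prefix[:-1]
--             if not prefix:
--                 return ""
--     return prefix
--
-- def _common_suffix(strings: List[str]) -> str:
--     """Find longest common suffix."""
--     if not strings:
--         return ""
--     suffix = strings[0]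
--     for s in strings[1:]:
--         while not s.endswith(suffix):
--             suffix = suffix[1:]
--             if not suffix:
--                 return ""
--     return suffix
-- ===== SOURCE B (Python) =====
-- def _lcp2(a, b):
--     n = 0
--     for x, y in zip(a, b):
--         if x != y:
--             return a[:n]
--         n += 1
--     return a[:n]
--
-- def _strings_to_categorical(values, min_strip_len=10):
--     str_vals = [str(v) for v in values]
--
--     if len(str_vals) < 2:
--         return {v: str(v) for v in values}
--
--     # common prefix = lcp of the lexicographic extremes
--     prefix = _lcp2(min(str_vals), max(str_vals))
--     # common suffix = reversed lcp of the extremes of the char-reversed strings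
--     rev_vals = [s[::-1] for s in str_vals]
--     suffix = _lcp2(min(rev_vals), max(rev_vals))[::-1]
--
--     strip_prefix = len(prefix) >= min_strip_len
--     strip_suffix = len(suffix) >= min_strip_len
--
--     if not strip_prefix and not strip_suffix:
--         return {v: str(v) for v in values}
--
--     shortened = []
--     for s in str_vals:
--         result = s
--         prefix_indicator = ""
--         suffix_indicator = ""
--
--         if strip_prefix:
--             result = result[len(prefix):]
--             prefix_indicator = "..."
--
--         if strip_suffix and len(result) > len(suffix):
--             result = result[:-len(suffix)]
--             suffix_indicator = "..."
--
--         final = f"{prefix_indicator}{result}{suffix_indicator}"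
--         shortened.append(final if result else s)
--
--     if len(set(shortened)) == len(values):
--         return {orig: short for orig, short in zip(values, shortened)}
--
--     return {v: str(v) for v in values}
-- ===== Notes on version B (the rewrite author's own statement) =====
-- stated objective: alternative
-- what changed: The shrinking-candidate _common_prefix/_common_suffix helpers are replaced by computing the common prefix as the lcp of the lexicographic min and max of the strings, and the common suffix as the reversed lcp of the min/max of the char-reversed strings; everything downstream of the helpers is unchanged.
import Mathlib
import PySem

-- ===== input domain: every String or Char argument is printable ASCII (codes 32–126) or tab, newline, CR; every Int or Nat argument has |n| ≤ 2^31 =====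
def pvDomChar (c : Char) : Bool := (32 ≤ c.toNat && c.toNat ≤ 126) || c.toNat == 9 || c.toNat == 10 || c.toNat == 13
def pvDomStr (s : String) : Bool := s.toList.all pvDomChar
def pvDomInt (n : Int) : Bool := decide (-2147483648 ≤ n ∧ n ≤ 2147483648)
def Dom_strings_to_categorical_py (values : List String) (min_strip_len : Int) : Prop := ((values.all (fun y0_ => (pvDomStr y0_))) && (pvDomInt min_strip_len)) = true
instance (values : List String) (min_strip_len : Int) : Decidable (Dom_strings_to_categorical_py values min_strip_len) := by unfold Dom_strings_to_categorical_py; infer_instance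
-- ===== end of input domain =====

-- B replaces A's shrinking-candidate common-prefix/suffix scans by the lcp of the two
-- lexicographic extremes (min/max of the strings; min/max of the char-reversed strings for
-- the suffix); the body downstream of the two helpers is the same code in Source A and Source B.

-- ===== PORT A =====

-- downstream body shared verbatim by Source A and Source B: the {v: str(v)} fallback dict, the
-- stripping loop, the set-uniqueness check and the zip dict
def pyIdDict (values : List String) : List (String × String) :=
  (values.foldl (fun d v => PySem.Dict.insert d v v) PySem.Dict.empty).items

def pyStrCatBuild (values : List String) (pref suf : List Char) (m : Int) : List (String × String) :=
  let strip_p := decide (m ≤ (pref.length : Int))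
  let strip_s := decide (m ≤ (suf.length : Int))
  if !strip_p && !strip_s then pyIdDict values
  else
    let shortened := values.map (fun s =>
      let r0 := s.toList
      let (r1, pi) := if strip_p then (r0.drop pref.length, "...") else (r0, "")
      let (r2, si) := if strip_s && decide (suf.length < r1.length)
                      then (PySem.List.slice r1 none (some (-(suf.length : Int))), "...")
                      else (r1, "")
      if r2 ≠ [] then pi ++ String.ofList r2 ++ si else s)
    if (PySem.Set.ofList shortened).length = values.length then
      ((values.zip shortened).foldl (fun d p => PySem.Dict.insert d p.1 p.2) PySem.Dict.empty).items
    else pyIdDict values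

-- A's _common_prefix inner while loop: shrink the candidate from the back
def shrinkP (s pre : List Char) : List Char :=
  if pre.isPrefixOf s then pre
  else
    let pre' := pre.dropLast
    if pre' = [] then [] else shrinkP s pre'
termination_by pre.length
decreasing_by
  have hne : pre ≠ [] := by rintro rfl; simp [List.isPrefixOf] at *
  have := List.length_pos_iff.mpr hne
  simp only [List.length_dropLast]; omega

def commonPrefixA (strings : List (List Char)) : List Char :=
  match strings with
  | [] => []
  | h :: t => t.foldl (fun pre s => shrinkP s pre) h

-- A's _common_suffix inner while loop: shrink the candidate from the front
def shrinkS (s suf : List Char) : List Char :=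
  if suf.isSuffixOf s then suf
  else
    let suf' := suf.tail
    if suf' = [] then [] else shrinkS s suf'
termination_by suf.length
decreasing_by
  have hne : suf ≠ [] := by rintro rfl; simp [List.isSuffixOf] at *
  cases suf with
  | nil => simp at hne
  | cons a t => simp

def commonSuffixA (strings : List (List Char)) : List Char :=
  match strings with
  | [] => []
  | h :: t => t.foldl (fun suf s => shrinkS s suf) h

def strings_to_categorical_py (values : List String) (min_strip_len : Int) : List (String × String) :=
  if values.length < 2 then pyIdDict values
  else
    pyStrCatBuild values
      (commonPrefixA (values.map String.toList))
      (commonSuffixA (values.map String.toList))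
      min_strip_len

-- ===== PORT B =====

-- Source B's _lcp2 zip loop: count matching leading chars, then return a[:n]
def lcpLen : List Char → List Char → Nat
  | x :: xs, y :: ys => if x = y then lcpLen xs ys + 1 else 0
  | _, _ => 0

def lcp2 (a b : List Char) : List Char := a.take (lcpLen a b)

def strings_to_categorical_py_alt (values : List String) (min_strip_len : Int) : List (String × String) :=
  if values.length < 2 then pyIdDict values
  else
    let lo := (PySem.List.min? values (fun s => s)).getD ""
    let hi := (PySem.List.max? values (fun s => s)).getD ""
    let pref := lcp2 lo.toList hi.toList
    let rev := values.map (fun s => String.ofList s.toList.reverse)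
    let rlo := (PySem.List.min? rev (fun s => s)).getD ""
    let rhi := (PySem.List.max? rev (fun s => s)).getD ""
    let suf := (lcp2 rlo.toList rhi.toList).reverse
    pyStrCatBuild values pref suf min_strip_len

-- ===== PRECONDITION & SPEC =====
def Spec_strings_to_categorical_py (values : List String) (min_strip_len : Int) (out : List (String × String)) : Prop := out = strings_to_categorical_py_alt values min_strip_len
instance (values : List String) (min_strip_len : Int) (out : List (String × String)) : Decidable (Spec_strings_to_categorical_py values min_strip_len out) := by unfold Spec_strings_to_categorical_py; infer_instance

-- ===== CLAIM (what is proved, stated in full; the proofs are below) =====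
def Claim_equal_strings_to_categorical_py : Prop := ∀ (values : List String) (min_strip_len : Int), Dom_strings_to_categorical_py values min_strip_len → Spec_strings_to_categorical_py values min_strip_len (strings_to_categorical_py values min_strip_len)

-- ===== LEMMAS AND PROOFS =====

theorem prefix_antisymm {a b : List Char} (h1 : a <+: b) (h2 : b <+: a) : a = b :=
  h1.eq_of_length (le_antisymm h1.length_le h2.length_le)

theorem suffix_antisymm {a b : List Char} (h1 : a <:+ b) (h2 : b <:+ a) : a = b := by
  have := prefix_antisymm (List.reverse_prefix.mpr h1) (List.reverse_prefix.mpr h2)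
  simpa using congrArg List.reverse this

theorem lcp2_cons_eq (x : Char) (a b : List Char) : lcp2 (x :: a) (x :: b) = x :: lcp2 a b := by
  simp [lcp2, lcpLen]

theorem lcp2_cons_ne {x y : Char} (h : x ≠ y) (a b : List Char) : lcp2 (x :: a) (y :: b) = [] := by
  simp [lcp2, lcpLen, h]

theorem lcp2_prefix_left (a b : List Char) : lcp2 a b <+: a := List.take_prefix _ _

theorem lcp2_prefix_right : ∀ (a b : List Char), lcp2 a b <+: b := by
  intro a
  induction a with
  | nil => intro b; simp [lcp2, lcpLen]
  | cons x xs ih =>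
    intro b
    cases b with
    | nil => simp [lcp2, lcpLen]
    | cons y ys =>
      by_cases hxy : x = y
      · subst hxy
        simpa [lcp2, lcpLen, List.cons_prefix_cons] using ih ys
      · simp [lcp2, lcpLen, hxy]

theorem prefix_lcp2 : ∀ (p a b : List Char), p <+: a → p <+: b → p <+: lcp2 a b := by
  intro p
  induction p with
  | nil => intro a b _ _; exact List.nil_prefix
  | cons c p' ih =>
    intro a b h1 h2
    cases a with
    | nil => exact absurd h1 (by simp)
    | cons x a' =>
      cases b with
      | nil => exact absurd h2 (by simp)
      | cons y b' =>
        rw [List.cons_prefix_cons] at h1 h2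
        obtain ⟨rfl, h1⟩ := h1
        obtain ⟨rfl, h2⟩ := h2
        rw [lcp2_cons_eq, List.cons_prefix_cons]
        exact ⟨rfl, ih a' b' h1 h2⟩

theorem proper_prefix_dropLast {p a : List Char} (h : p <+: a) (hne : p ≠ a) : p <+: a.dropLast := by
  have hlt : p.length < a.length := by
    rcases lt_or_eq_of_le h.length_le with h' | h'
    · exact h'
    · exact absurd (h.eq_of_length h') hne
  rw [List.dropLast_eq_take]
  exact List.prefix_take_iff.mpr ⟨h, by omega⟩

theorem rev_tail (l : List Char) : l.tail.reverse = l.reverse.dropLast := by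
  cases l with
  | nil => rfl
  | cons x t => simp

theorem proper_suffix_tail {p a : List Char} (h : p <:+ a) (hne : p ≠ a) : p <:+ a.tail := by
  have h1 : p.reverse <+: a.reverse := List.reverse_prefix.mpr h
  have h2 : p.reverse ≠ a.reverse := fun hc => hne (by simpa using congrArg List.reverse hc)
  have h3 := proper_prefix_dropLast h1 h2
  rw [← rev_tail] at h3
  simpa using List.reverse_prefix.mp (by simpa using h3)

theorem prefix_shrinkP_iff (s pre p : List Char) : p <+: shrinkP s pre ↔ p <+: pre ∧ p <+: s := by
  fun_induction shrinkP s pre with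
  | case1 pre hp =>
    rw [List.isPrefixOf_iff_prefix] at hp
    exact ⟨fun h => ⟨h, h.trans hp⟩, fun ⟨h1, _⟩ => h1⟩
  | case2 pre hp pre' heq =>
    rw [List.isPrefixOf_iff_prefix] at hp
    simp only [List.prefix_nil]
    constructor
    · rintro rfl; exact ⟨List.nil_prefix, List.nil_prefix⟩
    · rintro ⟨h1, h2⟩
      by_cases hpe : p = pre
      · subst hpe; exact absurd h2 hp
      · have h3 : p <+: pre.dropLast := proper_prefix_dropLast h1 hpe
        have h4 : pre.dropLast = [] := heq
        rw [h4] at h3; simpa using h3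
  | case3 pre hp pre' hne ih =>
    rw [List.isPrefixOf_iff_prefix] at hp
    rw [ih]
    constructor
    · rintro ⟨h1, h2⟩
      exact ⟨(show p <+: pre.dropLast from h1).trans (List.dropLast_prefix pre), h2⟩
    · rintro ⟨h1, h2⟩
      refine ⟨?_, h2⟩
      by_cases hpe : p = pre
      · subst hpe; exact absurd h2 hp
      · exact proper_prefix_dropLast h1 hpe

theorem suffix_shrinkS_iff (s suf p : List Char) : p <:+ shrinkS s suf ↔ p <:+ suf ∧ p <:+ s := by
  fun_induction shrinkS s suf with
  | case1 suf hp =>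
    rw [List.isSuffixOf_iff_suffix] at hp
    exact ⟨fun h => ⟨h, h.trans hp⟩, fun ⟨h1, _⟩ => h1⟩
  | case2 suf hp suf' heq =>
    rw [List.isSuffixOf_iff_suffix] at hp
    simp only [List.suffix_nil]
    constructor
    · rintro rfl; exact ⟨List.nil_suffix, List.nil_suffix⟩
    · rintro ⟨h1, h2⟩
      by_cases hpe : p = suf
      · subst hpe; exact absurd h2 hp
      · have h3 : p <:+ suf.tail := proper_suffix_tail h1 hpe
        have h4 : suf.tail = [] := heq
        rw [h4] at h3; simpa using h3
  | case3 suf hp suf' hne ih =>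
    rw [List.isSuffixOf_iff_suffix] at hp
    rw [ih]
    constructor
    · rintro ⟨h1, h2⟩
      exact ⟨(show p <:+ suf.tail from h1).trans (List.tail_suffix suf), h2⟩
    · rintro ⟨h1, h2⟩
      refine ⟨?_, h2⟩
      by_cases hpe : p = suf
      · subst hpe; exact absurd h2 hp
      · exact proper_suffix_tail h1 hpe

theorem fold_rel_iff {R : List Char → List Char → Prop}
    {shr : List Char → List Char → List Char}
    (hshr : ∀ s pre p, R p (shr s pre) ↔ R p pre ∧ R p s) :
    ∀ (t : List (List Char)) (h0 p : List Char),
      R p (t.foldl (fun pre s => shr s pre) h0) ↔ R p h0 ∧ ∀ s ∈ t, R p s := by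
  intro t
  induction t with
  | nil => intro h0 p; simp
  | cons x xs ih =>
    intro h0 p
    simp only [List.foldl_cons, ih, hshr, List.mem_cons]
    constructor
    · rintro ⟨⟨h1, h2⟩, h3⟩
      refine ⟨h1, fun s hs => ?_⟩
      rcases hs with rfl | hs
      · exact h2
      · exact h3 s hs
    · rintro ⟨h1, h2⟩
      exact ⟨⟨h1, h2 x (Or.inl rfl)⟩, fun s hs => h2 s (Or.inr hs)⟩

theorem lex_mid : ∀ (a b c : List Char), List.Lex (· < ·) a b → List.Lex (· < ·) b c →
    lcp2 a c <+: b := by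
  intro a
  induction a with
  | nil => intro b c _ _; simp [lcp2, lcpLen]
  | cons x a' ih =>
    intro b c h1 h2
    cases c with
    | nil => simp [lcp2, lcpLen]
    | cons z c' =>
      by_cases hxz : x = z
      · subst hxz
        rw [lcp2_cons_eq]
        cases h1 with
        | cons h1' =>
          rename_i b'
          cases h2 with
          | cons h2' => exact List.cons_prefix_cons.mpr ⟨rfl, ih b' c' h1' h2'⟩
          | rel h => exact absurd h (lt_irrefl x)
        | rel hlt =>
          rename_i y b'
          cases h2 with
          | cons h2' => exact absurd hlt (lt_irrefl _)
          | rel h => exact absurd (hlt.trans h) (lt_irrefl x)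
      · rw [lcp2_cons_ne hxz]; exact List.nil_prefix

theorem le_mid (a b c : List Char) (h1 : a ≤ b) (h2 : b ≤ c) : lcp2 a c <+: b := by
  rcases lt_or_eq_of_le h1 with h1 | rfl
  · rcases lt_or_eq_of_le h2 with h2 | rfl
    · exact lex_mid a b c h1 h2
    · exact lcp2_prefix_right a b
  · exact lcp2_prefix_left a c

theorem str_le_mid (a b c : String) (h1 : a ≤ b) (h2 : b ≤ c) :
    lcp2 a.toList c.toList <+: b.toList :=
  le_mid _ _ _ (String.le_iff_toList_le.mp h1) (String.le_iff_toList_le.mp h2)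

theorem prefA_eq (values : List String) (h2 : ¬ values.length < 2) :
    commonPrefixA (values.map String.toList) =
      lcp2 ((PySem.List.min? values (fun s => s)).getD "").toList
           ((PySem.List.max? values (fun s => s)).getD "").toList := by
  cases values with
  | nil => simp at h2
  | cons v0 vs =>
    cases hmin : PySem.List.min? (v0 :: vs) (fun s => s) with
    | none => exact absurd ((PySem.List.min?_eq_none_iff _ _).mp hmin) (by simp)
    | some lo =>
    cases hmax : PySem.List.max? (v0 :: vs) (fun s => s) with
    | none => exact absurd ((PySem.List.max?_eq_none_iff _ _).mp hmax) (by simp)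
    | some hi =>
    simp only [Option.getD_some]
    have hlo_mem := PySem.List.min?_mem hmin
    have hhi_mem := PySem.List.max?_mem hmax
    have hlo_min := PySem.List.min?_isMin hmin
    have hhi_max := PySem.List.max?_isMax hmax
    have hcp : commonPrefixA ((v0 :: vs).map String.toList) =
        (vs.map String.toList).foldl (fun pre s => shrinkP s pre) v0.toList := by
      simp [commonPrefixA]
    rw [hcp]
    set F := (vs.map String.toList).foldl (fun pre s => shrinkP s pre) v0.toList with hF
    have charF := fold_rel_iff (R := (· <+: ·)) prefix_shrinkP_iff (vs.map String.toList) v0.toList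
    have hself := (charF F).mp (List.prefix_refl F)
    have all_mem : ∀ v ∈ v0 :: vs, F <+: v.toList := by
      intro v hv
      rcases List.mem_cons.mp hv with rfl | hv
      · exact hself.1
      · exact hself.2 v.toList (List.mem_map_of_mem hv)
    apply prefix_antisymm
    · exact prefix_lcp2 _ _ _ (all_mem lo hlo_mem) (all_mem hi hhi_mem)
    · refine (charF _).mpr ⟨?_, ?_⟩
      · exact str_le_mid lo v0 hi (hlo_min v0 (by simp)) (hhi_max v0 (by simp))
      · intro s hs
        obtain ⟨v, hv, rfl⟩ := List.mem_map.mp hs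
        exact str_le_mid lo v hi (hlo_min v (by simp [hv])) (hhi_max v (by simp [hv]))

theorem sufA_eq (values : List String) (h2 : ¬ values.length < 2) :
    commonSuffixA (values.map String.toList) =
      (lcp2 ((PySem.List.min? (values.map (fun s => String.ofList s.toList.reverse)) (fun s => s)).getD "").toList
            ((PySem.List.max? (values.map (fun s => String.ofList s.toList.reverse)) (fun s => s)).getD "").toList).reverse := by
  cases values with
  | nil => simp at h2
  | cons v0 vs =>
    cases hmin : PySem.List.min? ((v0 :: vs).map (fun s => String.ofList s.toList.reverse)) (fun s => s) with
    | none => exact absurd ((PySem.List.min?_eq_none_iff _ _).mp hmin) (by simp)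
    | some rlo =>
    cases hmax : PySem.List.max? ((v0 :: vs).map (fun s => String.ofList s.toList.reverse)) (fun s => s) with
    | none => exact absurd ((PySem.List.max?_eq_none_iff _ _).mp hmax) (by simp)
    | some rhi =>
    simp only [Option.getD_some]
    have hlo_mem := PySem.List.min?_mem hmin
    have hhi_mem := PySem.List.max?_mem hmax
    have hlo_min := PySem.List.min?_isMin hmin
    have hhi_max := PySem.List.max?_isMax hmax
    obtain ⟨vlo, hvlo, rfl⟩ := List.mem_map.mp hlo_mem
    obtain ⟨vhi, hvhi, rfl⟩ := List.mem_map.mp hhi_mem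
    have hcs : commonSuffixA ((v0 :: vs).map String.toList) =
        (vs.map String.toList).foldl (fun suf s => shrinkS s suf) v0.toList := by
      simp [commonSuffixA]
    rw [hcs]
    set F := (vs.map String.toList).foldl (fun suf s => shrinkS s suf) v0.toList with hF
    have charF := fold_rel_iff (R := (· <:+ ·)) suffix_shrinkS_iff (vs.map String.toList) v0.toList
    have hself := (charF F).mp (List.suffix_refl F)
    have all_mem : ∀ v ∈ v0 :: vs, F <:+ v.toList := by
      intro v hv
      rcases List.mem_cons.mp hv with rfl | hv
      · exact hself.1
      · exact hself.2 v.toList (List.mem_map_of_mem hv)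
    simp only [String.toList_ofList]
    set Z := lcp2 vlo.toList.reverse vhi.toList.reverse with hZ
    have hmid : ∀ v ∈ v0 :: vs, Z <+: v.toList.reverse := by
      intro v hv
      have hmem : String.ofList v.toList.reverse ∈ (v0 :: vs).map (fun s => String.ofList s.toList.reverse) :=
        List.mem_map_of_mem hv
      have h1 := hlo_min _ hmem
      have h2 := hhi_max _ hmem
      have := le_mid (String.ofList vlo.toList.reverse).toList (String.ofList v.toList.reverse).toList
        (String.ofList vhi.toList.reverse).toList
        (String.le_iff_toList_le.mp h1) (String.le_iff_toList_le.mp h2)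
      simpa using this
    apply suffix_antisymm
    · -- F <:+ Z.reverse
      have hFlo : F.reverse <+: vlo.toList.reverse := List.reverse_prefix.mpr (all_mem vlo hvlo)
      have hFhi : F.reverse <+: vhi.toList.reverse := List.reverse_prefix.mpr (all_mem vhi hvhi)
      have hFrev : F.reverse <+: Z := prefix_lcp2 _ _ _ hFlo hFhi
      exact List.reverse_prefix.mp (by simpa using hFrev)
    · -- Z.reverse <:+ F
      refine (charF _).mpr ⟨?_, ?_⟩
      · rw [← List.reverse_prefix]
        simpa using hmid v0 (by simp)
      · intro s hs
        obtain ⟨v, hv, rfl⟩ := List.mem_map.mp hs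
        rw [← List.reverse_prefix]
        simpa using hmid v (by simp [hv])

-- ===== VERDICT (by name: the statement is the Claim_ definition above) =====
theorem strings_to_categorical_py_spec : Claim_equal_strings_to_categorical_py := by
  intro values m _
  unfold Spec_strings_to_categorical_py strings_to_categorical_py strings_to_categorical_py_alt
  by_cases hlen : values.length < 2
  · simp [hlen]
  · simp only [hlen, if_false, prefA_eq values hlen, sufA_eq values hlen]
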